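-- pv_equiv track=rewrite | github.com/CharlesDdev/genAI-coding-questions | grok-ex34.py | longest_starts_with
-- ===== SOURCE A (Python) =====
-- def longest_starts_with(word1, word2):
--     len1 = 0
--     for char in word1:
--         len1 += 1
--     len2 = 0
--     for char in word2:
--         len2 += 1
--     starts_with_1 = True
--     if len2 < len1:
--         starts_with_1 = False
--     else:
--         for i in range(len1):
--             pos = 0
--             for char in word2:
--                 if char in word2:
--                     if pos == i and char != word1[pos]:
--                         starts_with_1 = False
--                     pos += 1
--     starts_with_2 = True # checks if word1 starts with word2
--     if len1 < len2:
--         starts_with_2 = False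
--     else:
--         for i in range(len2):
--             pos = 0
--             for char in word1:
--                 if pos == i and char != word2[pos]:
--                     starts_with_2 = False
--                 pos += 1
--     if starts_with_1 and len2 > len1: # decides which to return
--         return word2
--     elif starts_with_2 and len1 > len2:
--         return word1
--     else:
--         return word1
-- ===== SOURCE B (Python) =====
-- def longest_starts_with(word1, word2):
--     n1, n2 = len(word1), len(word2)
--     if n1 == n2:
--         return word1
--     shorter, longer = (word1, word2) if n1 < n2 else (word2, word1)
--     if all(a == b for a, b in zip(shorter, longer)):
--         return longer
--     return word1
-- ===== Notes on version B (the rewrite author's own statement) =====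
-- stated objective: simpler
-- what changed: Replaces A's counted length loops and two quadratic nested-scan directional prefix tests by one length selection of (shorter, longer) and a single linear zip prefix check.
import Mathlib
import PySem

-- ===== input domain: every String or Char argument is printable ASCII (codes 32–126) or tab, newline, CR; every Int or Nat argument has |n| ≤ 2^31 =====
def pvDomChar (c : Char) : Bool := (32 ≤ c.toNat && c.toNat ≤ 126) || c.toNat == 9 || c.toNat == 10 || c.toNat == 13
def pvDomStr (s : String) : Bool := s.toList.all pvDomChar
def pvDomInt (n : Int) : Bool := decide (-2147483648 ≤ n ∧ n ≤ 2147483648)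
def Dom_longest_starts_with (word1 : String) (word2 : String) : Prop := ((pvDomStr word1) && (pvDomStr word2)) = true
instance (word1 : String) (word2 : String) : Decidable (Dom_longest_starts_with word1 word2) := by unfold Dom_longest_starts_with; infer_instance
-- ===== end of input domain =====

-- B: selects (shorter, longer) by length and does one linear zip prefix check instead of
-- A's hand-counted length loops and two nested-scan directional prefix tests.

-- ===== PORT A =====
-- literal transliteration: hand-counted lengths, then two directional prefix checks,
-- each a loop over range(len) whose body scans the other word carrying (flag, pos).
-- word1[pos]/word2[pos] are only read at pos = i < that word's length, so pyGetD is exact there.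
def longest_starts_with (word1 : String) (word2 : String) : String :=
  let w1 := word1.toList
  let w2 := word2.toList
  let len1 := w1.foldl (fun n _ => n + 1) 0
  let len2 := w2.foldl (fun n _ => n + 1) 0
  let starts_with_1 : Bool :=
    if len2 < len1 then false
    else
      (List.range len1).foldl (fun sw i =>
        (w2.foldl (fun (st : Bool × Nat) c =>
          if c ∈ w2 then
            (if st.2 = i ∧ c ≠ PySem.List.pyGetD w1 (st.2 : Int) ' ' then false else st.1, st.2 + 1)
          else st) (sw, 0)).1) true
  let starts_with_2 : Bool :=
    if len1 < len2 then false
    else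
      (List.range len2).foldl (fun sw i =>
        (w1.foldl (fun (st : Bool × Nat) c =>
          (if st.2 = i ∧ c ≠ PySem.List.pyGetD w2 (st.2 : Int) ' ' then false else st.1, st.2 + 1)) (sw, 0)).1) true
  if starts_with_1 && decide (len2 > len1) then word2
  else if starts_with_2 && decide (len1 > len2) then word1
  else word1

-- ===== PORT B =====
def longest_starts_with_alt (word1 : String) (word2 : String) : String :=
  let n1 := word1.toList.length
  let n2 := word2.toList.length
  if n1 = n2 then word1
  else
    let p := if n1 < n2 then (word1, word2) else (word2, word1)
    if (p.1.toList.zip p.2.toList).all (fun q => q.1 == q.2) then p.2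
    else word1

-- ===== PRECONDITION & SPEC =====
def Spec_longest_starts_with (word1 : String) (word2 : String) (out : String) : Prop := out = longest_starts_with_alt word1 word2
instance (word1 : String) (word2 : String) (out : String) : Decidable (Spec_longest_starts_with word1 word2 out) := by unfold Spec_longest_starts_with; infer_instance

-- ===== CLAIM (what is proved, stated in full; the proofs are below) =====
def Claim_equal_longest_starts_with : Prop := ∀ (word1 : String) (word2 : String), Dom_longest_starts_with word1 word2 → Spec_longest_starts_with word1 word2 (longest_starts_with word1 word2)

-- ===== LEMMAS AND PROOFS =====

-- the hand-counted length loop counts the length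
theorem pv_count (l : List Char) : ∀ n : Nat, l.foldl (fun n _ => n + 1) n = n + l.length := by
  induction l with
  | nil => simp
  | cons c t ih => intro n; simp only [List.foldl, ih, List.length_cons]; omega

-- dropping the redundant `c ∈ w2` membership test in A's first inner scan
theorem pv_drop_mem (w1 w2 : List Char) (sw : Bool) (i : Nat) :
    (w2.foldl (fun (st : Bool × Nat) c =>
      if c ∈ w2 then
        (if st.2 = i ∧ c ≠ PySem.List.pyGetD w1 (st.2 : Int) ' ' then false else st.1, st.2 + 1)
      else st) (sw, 0))
    = (w2.foldl (fun (st : Bool × Nat) c =>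
        (if st.2 = i ∧ c ≠ PySem.List.pyGetD w1 (st.2 : Int) ' ' then false else st.1, st.2 + 1)) (sw, 0)) :=
  PySem.List.foldl_congr_mem _ _ _ _ (fun st c hc => by simp [hc])

-- A's inner positional scan: starting from (sw, pos), the flag is cleared exactly when
-- the scan passes position i and the character there differs from tgt[i]
theorem pv_inner (tgt : List Char) :
    ∀ (l : List Char) (sw : Bool) (pos i : Nat),
      (l.foldl (fun (st : Bool × Nat) c =>
        (if st.2 = i ∧ c ≠ PySem.List.pyGetD tgt (st.2 : Int) ' ' then false else st.1, st.2 + 1)) (sw, pos)).1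
      = (sw && !(decide (pos ≤ i) && decide (i - pos < l.length) && decide (l.getD (i - pos) ' ' ≠ tgt.getD i ' '))) := by
  intro l
  induction l with
  | nil => intro sw pos i; simp
  | cons c t ih =>
    intro sw pos i
    simp only [List.foldl, ih]
    by_cases h : pos = i
    · subst h
      have h1 : ¬ pos + 1 ≤ pos := by omega
      simp only [PySem.List.pyGetD_natCast, Nat.sub_self, List.getD_cons_zero, h1, decide_false,
        Bool.false_and, Bool.not_false, Bool.and_true, List.length_cons]
      by_cases hf : c ≠ tgt.getD pos ' ' <;>
        simp [Bool.and_comm]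
    · have h1 : ¬ (pos = i ∧ c ≠ PySem.List.pyGetD tgt (pos : Int) ' ') := fun hh => h hh.1
      simp only [if_neg h1]
      by_cases hle : pos ≤ i
      · obtain ⟨k, hk⟩ : ∃ k, i - pos = k + 1 := ⟨i - pos - 1, by omega⟩
        have h2 : i - (pos + 1) = k := by omega
        have h3 : pos + 1 ≤ i := by omega
        have h4 : (i - pos < t.length + 1) = (k < t.length) := by
          simp only [eq_iff_iff]; omega
        simp [hk, h2, h3, hle]
      · have h4 : ¬ pos + 1 ≤ i := by omega
        simp [hle, h4]

-- the outer flag loop is an and-fold, i.e. `all`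
theorem pv_outer (g : Nat → Bool) :
    ∀ (l : List Nat) (sw : Bool), l.foldl (fun s i => s && g i) sw = (sw && l.all g) := by
  intro l
  induction l with
  | nil => simp
  | cons x t ih => intro sw; simp [List.foldl, ih, Bool.and_assoc]

-- A's directional prefix flag in indexed form (src scanned, tgt indexed, n ≤ src.length)
theorem pv_flag (src tgt : List Char) (n : Nat) (hn : n ≤ src.length) :
    (((List.range n).foldl (fun sw i =>
        (src.foldl (fun (st : Bool × Nat) c =>
          (if st.2 = i ∧ c ≠ PySem.List.pyGetD tgt (st.2 : Int) ' ' then false else st.1, st.2 + 1)) (sw, 0)).1) true) = true)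
      ↔ (∀ i, i < n → tgt.getD i ' ' = src.getD i ' ') := by
  have hfun : (fun (sw : Bool) (i : Nat) =>
      (src.foldl (fun (st : Bool × Nat) c =>
        (if st.2 = i ∧ c ≠ PySem.List.pyGetD tgt (st.2 : Int) ' ' then false else st.1, st.2 + 1)) (sw, 0)).1)
      = (fun (sw : Bool) (i : Nat) =>
          sw && !(decide (0 ≤ i) && decide (i - 0 < src.length) && decide (src.getD (i - 0) ' ' ≠ tgt.getD i ' '))) :=
    funext fun sw => funext fun i => pv_inner tgt src sw 0 i
  rw [hfun, pv_outer, Bool.true_and]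
  simp only [List.all_eq_true, List.mem_range, Nat.sub_zero, Nat.zero_le, decide_true,
    Bool.true_and, Bool.not_eq_eq_eq_not, Bool.not_true, Bool.and_eq_false_iff,
    decide_eq_false_iff_not, not_not, not_lt]
  constructor
  · intro h i hi
    rcases h i hi with h1 | h1
    · omega
    · exact h1.symm
  · intro h i hi
    exact Or.inr (h i hi).symm

-- B's zip-based prefix check, in indexed form
theorem pv_zip_all (a b : List Char) :
    (((a.zip b).all fun q => q.1 == q.2) = true) ↔
      (∀ i, i < a.length → i < b.length → a.getD i ' ' = b.getD i ' ') := by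
  induction a generalizing b with
  | nil => simp
  | cons c t ih =>
    cases b with
    | nil => simp
    | cons d u =>
      simp only [List.zip_cons_cons, List.all_cons, Bool.and_eq_true, beq_iff_eq, ih]
      constructor
      · rintro ⟨h1, h2⟩ i hi1 hi2
        cases i with
        | zero => simpa using h1
        | succ j =>
          simpa [List.getD_cons_succ] using
            h2 j (by simpa using hi1) (by simpa using hi2)
      · intro h
        refine ⟨by simpa using h 0 (by simp) (by simp), fun i hi1 hi2 => ?_⟩
        simpa [List.getD_cons_succ] using
          h (i + 1) (by simpa using hi1) (by simpa using hi2)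

-- characterization of port A: word2 iff word1 is a strict proper prefix of word2, else word1
theorem pv_A_char (word1 word2 : String) :
    longest_starts_with word1 word2 =
      if word1.toList.length < word2.toList.length ∧
         (∀ i, i < word1.toList.length → word1.toList.getD i ' ' = word2.toList.getD i ' ')
      then word2 else word1 := by
  unfold longest_starts_with
  simp only [pv_count, Nat.zero_add, pv_drop_mem]
  rcases Nat.lt_trichotomy word1.toList.length word2.toList.length with hlt | heq | hgt
  · have h2 : ¬ word2.toList.length < word1.toList.length := by omega
    rw [if_neg h2, if_pos hlt]
    have hd1 : decide (word2.toList.length > word1.toList.length) = true := decide_eq_true hlt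
    rw [hd1, Bool.and_true, Bool.false_and, if_neg Bool.false_ne_true]
    by_cases hP : ∀ i, i < word1.toList.length → word1.toList.getD i ' ' = word2.toList.getD i ' '
    · have hs := (pv_flag word2.toList word1.toList word1.toList.length (by omega)).mpr hP
      rw [hs, if_pos rfl, if_pos ⟨hlt, hP⟩]
    · have hs : ((List.range word1.toList.length).foldl (fun sw i =>
          (word2.toList.foldl (fun (st : Bool × Nat) c =>
            (if st.2 = i ∧ c ≠ PySem.List.pyGetD word1.toList (st.2 : Int) ' ' then false else st.1, st.2 + 1)) (sw, 0)).1) true) = false := by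
        rcases Bool.eq_false_or_eq_true ((List.range word1.toList.length).foldl (fun sw i =>
          (word2.toList.foldl (fun (st : Bool × Nat) c =>
            (if st.2 = i ∧ c ≠ PySem.List.pyGetD word1.toList (st.2 : Int) ' ' then false else st.1, st.2 + 1)) (sw, 0)).1) true) with h | h
        · exact absurd ((pv_flag word2.toList word1.toList word1.toList.length (by omega)).mp h) hP
        · exact h
      rw [hs, if_neg Bool.false_ne_true, if_neg (fun hh => hP hh.2)]
  · have h1 : ¬ word2.toList.length < word1.toList.length := by omega
    have h2 : ¬ word1.toList.length < word2.toList.length := by omega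
    have hd1 : decide (word2.toList.length > word1.toList.length) = false := decide_eq_false h2
    have hd2 : decide (word1.toList.length > word2.toList.length) = false := decide_eq_false h1
    rw [hd1, hd2, Bool.and_false, Bool.and_false, if_neg Bool.false_ne_true,
      if_neg Bool.false_ne_true, if_neg (fun hh => h2 hh.1)]
  · have h2 : ¬ word1.toList.length < word2.toList.length := by omega
    have hd1 : decide (word2.toList.length > word1.toList.length) = false := decide_eq_false h2
    rw [hd1, Bool.and_false, if_neg Bool.false_ne_true, ite_self, if_neg (fun hh => h2 hh.1)]

-- characterization of port B: the same case analysis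
theorem pv_B_char (word1 word2 : String) :
    longest_starts_with_alt word1 word2 =
      if word1.toList.length < word2.toList.length ∧
         (∀ i, i < word1.toList.length → word1.toList.getD i ' ' = word2.toList.getD i ' ')
      then word2 else word1 := by
  unfold longest_starts_with_alt
  simp only []
  rcases Nat.lt_trichotomy word1.toList.length word2.toList.length with hlt | heq | hgt
  · have hne : ¬ word1.toList.length = word2.toList.length := by omega
    rw [if_neg hne, if_pos hlt]
    by_cases hP : ∀ i, i < word1.toList.length → word1.toList.getD i ' ' = word2.toList.getD i ' '
    · have hz : ((word1.toList.zip word2.toList).all fun q => q.1 == q.2) = true :=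
        (pv_zip_all _ _).mpr (fun i hi1 _ => hP i hi1)
      rw [hz, if_pos rfl, if_pos ⟨hlt, hP⟩]
    · have hz : ((word1.toList.zip word2.toList).all fun q => q.1 == q.2) = false := by
        rcases Bool.eq_false_or_eq_true ((word1.toList.zip word2.toList).all fun q => q.1 == q.2) with h | h
        · exact absurd (fun i hi => (pv_zip_all _ _).mp h i hi (by omega)) hP
        · exact h
      rw [hz, if_neg Bool.false_ne_true, if_neg (fun hh => hP hh.2)]
  · rw [if_pos heq, if_neg (fun hh : _ ∧ _ => absurd heq (Nat.ne_of_lt hh.1))]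
  · have hne : ¬ word1.toList.length = word2.toList.length := by omega
    have h2 : ¬ word1.toList.length < word2.toList.length := by omega
    rw [if_neg hne, if_neg h2, ite_self, if_neg (fun hh => h2 hh.1)]

-- ===== VERDICT (by name: the statement is the Claim_ definition above) =====
theorem longest_starts_with_spec : Claim_equal_longest_starts_with := by
  intro word1 word2 _
  unfold Spec_longest_starts_with
  rw [pv_A_char, pv_B_char]
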